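-- pv_equiv track=rewrite | github.com/hwanJP/micro-lab-predict | barchart.py | create_z_grid
-- ===== SOURCE A (Python) =====
-- def create_z_grid(len_x_df_uniq, len_y_df_uniq, z_df):
--     z_temp_df = []
--     z_index = 0
--
--     for y in range(len_y_df_uniq):
--         for x in range(len_x_df_uniq):
--             if z_index < len(z_df):
--                 z_temp_df.append(z_df[z_index])
--                 z_index += 1
--             else:
--                 z_temp_df.append(None)
--     return z_temp_df
-- ===== SOURCE B (Python) =====
-- def create_z_grid(len_x_df_uniq, len_y_df_uniq, z_df):
--     total = max(0, len_x_df_uniq) * max(0, len_y_df_uniq)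
--     n = min(len(z_df), total)
--     return list(z_df[:n]) + [None] * (total - n)
-- ===== Notes on version B (the rewrite author's own statement) =====
-- stated objective: simpler
-- what changed: Replaced the nested y/x counting loops (whose coordinates are never used) by a closed form: take the first min(len(z_df), max(0,x)*max(0,y)) elements and pad with None.
import Mathlib
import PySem

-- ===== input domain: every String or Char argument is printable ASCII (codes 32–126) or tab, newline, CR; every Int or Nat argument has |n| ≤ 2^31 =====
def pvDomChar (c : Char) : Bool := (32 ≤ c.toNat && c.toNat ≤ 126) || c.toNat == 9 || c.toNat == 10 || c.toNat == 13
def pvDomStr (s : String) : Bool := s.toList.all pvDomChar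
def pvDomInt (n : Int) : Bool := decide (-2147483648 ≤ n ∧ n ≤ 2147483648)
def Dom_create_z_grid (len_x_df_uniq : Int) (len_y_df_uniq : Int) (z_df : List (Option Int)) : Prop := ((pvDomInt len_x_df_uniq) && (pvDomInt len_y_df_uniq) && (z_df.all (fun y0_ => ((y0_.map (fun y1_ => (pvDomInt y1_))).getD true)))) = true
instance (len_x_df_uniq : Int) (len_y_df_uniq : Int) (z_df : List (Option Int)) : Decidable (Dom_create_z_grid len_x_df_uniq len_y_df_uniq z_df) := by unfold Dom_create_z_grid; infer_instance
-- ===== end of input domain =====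

-- B replaces A's nested y/x counting loops (whose loop variables are never used) by a closed
-- form: take the first min(len(z_df), max(0,x)*max(0,y)) elements of z_df and pad with None.

-- ===== PORT A =====
-- literal transliteration of A: nested for-loops over range(y) × range(x), state (z_temp_df, z_index);
-- z_df[z_index] is only read under z_index < len(z_df), where pyGet? is some, so .getD none is exact.
def create_z_grid (len_x_df_uniq : Int) (len_y_df_uniq : Int) (z_df : List (Option Int)) : List (Option Int) :=
  ((PySem.List.pyRange 0 len_y_df_uniq 1).foldl (fun (st : List (Option Int) × Int) _y =>
      (PySem.List.pyRange 0 len_x_df_uniq 1).foldl (fun (st : List (Option Int) × Int) _x =>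
        if st.2 < (z_df.length : Int) then
          (st.1 ++ [(PySem.List.pyGet? z_df st.2).getD none], st.2 + 1)
        else
          (st.1 ++ [none], st.2)) st)
    (([] : List (Option Int)), (0 : Int))).1

-- ===== PORT B =====
def create_z_grid_alt (len_x_df_uniq : Int) (len_y_df_uniq : Int) (z_df : List (Option Int)) : List (Option Int) :=
  let total : Int := max 0 len_x_df_uniq * max 0 len_y_df_uniq
  let n : Int := min (z_df.length : Int) total
  z_df.take n.toNat ++ List.replicate (total - n).toNat none

-- ===== PRECONDITION & SPEC =====
def Spec_create_z_grid (len_x_df_uniq : Int) (len_y_df_uniq : Int) (z_df : List (Option Int)) (out : List (Option Int)) : Prop := out = create_z_grid_alt len_x_df_uniq len_y_df_uniq z_df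
instance (len_x_df_uniq : Int) (len_y_df_uniq : Int) (z_df : List (Option Int)) (out : List (Option Int)) : Decidable (Spec_create_z_grid len_x_df_uniq len_y_df_uniq z_df out) := by unfold Spec_create_z_grid; infer_instance

-- ===== CLAIM (what is proved, stated in full; the proofs are below) =====
def Claim_equal_create_z_grid : Prop := ∀ (len_x_df_uniq : Int) (len_y_df_uniq : Int) (z_df : List (Option Int)), Dom_create_z_grid len_x_df_uniq len_y_df_uniq z_df → Spec_create_z_grid len_x_df_uniq len_y_df_uniq z_df (create_z_grid len_x_df_uniq len_y_df_uniq z_df)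

-- ===== LEMMAS AND PROOFS =====

-- the loop state of A after k appends: prefix of z plus None padding, and z_index = min |z| k
def czState (z : List (Option Int)) (k : Nat) : List (Option Int) × Int :=
  (z.take (min z.length k) ++ List.replicate (k - min z.length k) none, ((min z.length k : Nat) : Int))

theorem czStep (z : List (Option Int)) (k : Nat) :
    (if (czState z k).2 < (z.length : Int) then
      ((czState z k).1 ++ [(PySem.List.pyGet? z (czState z k).2).getD none], (czState z k).2 + 1)
     else ((czState z k).1 ++ [none], (czState z k).2)) = czState z (k + 1) := by
  unfold czState
  by_cases h : k < z.length
  · have hm : min z.length k = k := by omega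
    have hm1 : min z.length (k + 1) = k + 1 := by omega
    have hget : (PySem.List.pyGet? z ((k : Nat) : Int)).getD none = z[k] := by
      simp [PySem.List.pyGet?, PySem.List.pyIdx?, h]
    simp only [hm, hm1, Nat.sub_self, List.replicate_zero, List.append_nil]
    rw [if_pos (by exact_mod_cast h)]
    have ht : z.take (k + 1) = z.take k ++ [z[k]] := by
      rw [List.take_add_one]; simp [List.getElem?_eq_getElem h]
    rw [hget, ht]
    simp
  · have hm : min z.length k = z.length := by omega
    have hm1 : min z.length (k + 1) = z.length := by omega
    simp only [hm, hm1]
    rw [if_neg (by omega)]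
    rw [show k + 1 - z.length = (k - z.length) + 1 from by omega, List.replicate_succ']
    simp [List.append_assoc]

theorem czFoldAny (z : List (Option Int)) (l : List Int) (k : Nat) :
    l.foldl (fun (st : List (Option Int) × Int) _x =>
        if st.2 < (z.length : Int) then
          (st.1 ++ [(PySem.List.pyGet? z st.2).getD none], st.2 + 1)
        else (st.1 ++ [none], st.2)) (czState z k) = czState z (k + l.length) := by
  induction l generalizing k with
  | nil => simp
  | cons a t ih =>
    simp only [List.foldl_cons, List.length_cons]
    rw [czStep z k, ih (k + 1)]
    congr 1
    omega

theorem czFoldOuter (z : List (Option Int)) (x : Int) (l : List Int) (k : Nat) :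
    l.foldl (fun (st : List (Option Int) × Int) _y =>
        (PySem.List.pyRange 0 x 1).foldl (fun (st : List (Option Int) × Int) _x =>
          if st.2 < (z.length : Int) then
            (st.1 ++ [(PySem.List.pyGet? z st.2).getD none], st.2 + 1)
          else (st.1 ++ [none], st.2)) st) (czState z k)
      = czState z (k + l.length * x.toNat) := by
  induction l generalizing k with
  | nil => simp
  | cons a t ih =>
    simp only [List.foldl_cons, List.length_cons]
    rw [czFoldAny z _ k]
    have hlen : (PySem.List.pyRange 0 x 1).length = x.toNat := by
      rw [PySem.List.length_pyRange_one]; congr 1; omega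
    rw [hlen, ih (k + x.toNat)]
    congr 1
    ring

theorem create_z_grid_eq_state (x y : Int) (z : List (Option Int)) :
    create_z_grid x y z = (czState z (y.toNat * x.toNat)).1 := by
  unfold create_z_grid
  have h0 : (([] : List (Option Int)), (0 : Int)) = czState z 0 := by
    simp [czState]
  rw [h0, czFoldOuter z x _ 0]
  congr 2
  rw [PySem.List.length_pyRange_one]
  simp

-- ===== VERDICT (by name: the statement is the Claim_ definition above) =====
theorem create_z_grid_spec : Claim_equal_create_z_grid := by
  intro x y z _
  unfold Spec_create_z_grid
  rw [create_z_grid_eq_state]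
  unfold create_z_grid_alt czState
  have hx : max 0 x = ((x.toNat : Nat) : Int) := by omega
  have hy : max 0 y = ((y.toNat : Nat) : Int) := by omega
  set T : Nat := y.toNat * x.toNat with hT
  have htot : max 0 x * max 0 y = ((T : Nat) : Int) := by
    rw [hx, hy, hT]; push_cast; ring
  simp only [htot]
  congr 2
  · omega
  · omega
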